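-- pv_equiv track=rewrite | github.com/prem332/shopsense-ai | tests/test_guardrails.py | detect_injection
-- ===== SOURCE A (Python) =====
-- def detect_injection(query: str) -> bool:
--     injection_patterns = [
--         "ignore previous", "ignore instructions",
--         "forget everything", "you are now",
--         "act as", "jailbreak", "system prompt",
--         "override", "bypass", "disable safety",
--     ]
--     return any(p in query.lower() for p in injection_patterns)
-- ===== SOURCE B (Python) =====
-- import re
--
-- _INJECTION_RE = re.compile("|".join(re.escape(p) for p in (
--     "ignore previous", "ignore instructions",
--     "forget everything", "you are now",
--     "act as", "jailbreak", "system prompt",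
--     "override", "bypass", "disable safety",
-- )))
--
--
-- def detect_injection(query: str) -> bool:
--     return _INJECTION_RE.search(query.lower()) is not None
-- ===== Notes on version B (the rewrite author's own statement) =====
-- stated objective: idiomatic
-- what changed: Replaces ten separate substring scans (any(p in q) over a list) by one precompiled regex alternation searched in a single pass over the lowercased query.
import Mathlib
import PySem

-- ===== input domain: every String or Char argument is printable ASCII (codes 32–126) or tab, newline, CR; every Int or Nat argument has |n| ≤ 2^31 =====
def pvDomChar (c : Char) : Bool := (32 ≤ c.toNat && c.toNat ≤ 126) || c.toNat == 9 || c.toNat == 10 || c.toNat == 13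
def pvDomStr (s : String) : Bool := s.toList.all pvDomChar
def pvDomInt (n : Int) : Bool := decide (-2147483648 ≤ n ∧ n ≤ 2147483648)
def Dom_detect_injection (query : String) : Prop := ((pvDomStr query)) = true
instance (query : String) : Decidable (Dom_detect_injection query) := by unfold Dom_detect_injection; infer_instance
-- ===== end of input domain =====

-- B replaces A's ten separate substring scans by one compiled regex alternation searched in a
-- single left-to-right pass over the lowercased query (objective: idiomatic).


-- ===== PORT A =====
-- the literal pattern list of A
def injectionPatterns : List String :=
  ["ignore previous", "ignore instructions",
   "forget everything", "you are now",
   "act as", "jailbreak", "system prompt",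
   "override", "bypass", "disable safety"]

-- any(p in query.lower() for p in injection_patterns)
def detect_injection (query : String) : Bool :=
  injectionPatterns.any (fun p => PySem.Str.isIn p (PySem.Str.lower query))

-- ===== PORT B =====
-- B's compiled alternation of the same ten literals, as char lists (the regex's alternatives)
def injectionAlts : List (List Char) :=
  ["ignore previous".toList, "ignore instructions".toList,
   "forget everything".toList, "you are now".toList,
   "act as".toList, "jailbreak".toList, "system prompt".toList,
   "override".toList, "bypass".toList, "disable safety".toList]

-- re.search of an alternation of literals: one left-to-right pass; at each start position try each
-- alternative in order, succeed on the first position where one matches as a prefix.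
def regexSearch (s : List Char) : Bool :=
  (injectionAlts.any (fun p => PySem.Chars.startswith s p)) ||
    (match s with
     | [] => false
     | _ :: t => regexSearch t)

def detect_injection_alt (query : String) : Bool :=
  regexSearch (PySem.Chars.lower query.toList)

-- ===== PRECONDITION & SPEC =====
def Spec_detect_injection (query : String) (out : Bool) : Prop := out = detect_injection_alt query
instance (query : String) (out : Bool) : Decidable (Spec_detect_injection query out) := by unfold Spec_detect_injection; infer_instance

-- ===== CLAIM (what is proved, stated in full; the proofs are below) =====
def Claim_equal_detect_injection : Prop := ∀ (query : String), Dom_detect_injection query → Spec_detect_injection query (detect_injection query)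

-- ===== LEMMAS AND PROOFS =====

-- the single scan finds a match iff some alternative occurs as an infix
theorem regexSearch_iff (s : List Char) :
    regexSearch s = true ↔ ∃ p ∈ injectionAlts, p <:+: s := by
  induction s with
  | nil =>
    rw [regexSearch]
    simp only [Bool.or_false, List.any_eq_true, PySem.Chars.startswith_iff]
    refine ⟨fun ⟨p, hp, h⟩ => ⟨p, hp, h.isInfix⟩, fun ⟨p, hp, h⟩ => ⟨p, hp, ?_⟩⟩
    rw [List.infix_nil] at h
    exact h ▸ List.nil_prefix
  | cons c t ih =>
    rw [regexSearch]
    simp only [Bool.or_eq_true, List.any_eq_true, PySem.Chars.startswith_iff, ih]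
    constructor
    · rintro (⟨p, hp, h⟩ | ⟨p, hp, h⟩)
      · exact ⟨p, hp, h.isInfix⟩
      · exact ⟨p, hp, h.trans (List.suffix_cons c t).isInfix⟩
    · rintro ⟨p, hp, h⟩
      rcases (List.infix_cons_iff).1 h with h | h
      · exact Or.inl ⟨p, hp, h⟩
      · exact Or.inr ⟨p, hp, h⟩

-- ===== VERDICT (by name: the statement is the Claim_ definition above) =====
theorem detect_injection_spec : Claim_equal_detect_injection := by
  intro query _
  unfold Spec_detect_injection detect_injection detect_injection_alt
  rw [Bool.eq_iff_iff, List.any_eq_true, regexSearch_iff]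
  constructor
  · rintro ⟨p, hp, h⟩
    rw [PySem.Str.isIn_iff_infix] at h
    refine ⟨p.toList, ?_, by simpa [PySem.Str.lower] using h⟩
    fin_cases hp <;> simp [injectionAlts]
  · rintro ⟨p, hp, h⟩
    have halts : injectionAlts = injectionPatterns.map String.toList := by
      simp [injectionAlts, injectionPatterns]
    rw [halts, List.mem_map] at hp
    obtain ⟨q, hq, rfl⟩ := hp
    exact ⟨q, hq, by rw [PySem.Str.isIn_iff_infix]; simpa [PySem.Str.lower] using h⟩
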